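-- pv_equiv track=rewrite | github.com/mansi306/Complete-Python-DSA-Bootcamp | 23-Data_Structure/15-GraphPractice_questions/15.9-No_of_operations_to_make_graph_connected.py | minOperationsToConnectComputers
-- ===== SOURCE A (Python) =====
-- from collections import deque, defaultdict
--
-- def minOperationsToConnectComputers(n, connections):
--     """
--     Returns the minimum number of operations required to connect all computers in the network.
--     If it is not possible, return -1.
--     """
--     if len(connections) < n - 1:
--         return -1
--
--     # Build the graph
--     graph = defaultdict(list)
--     for u, v in connections:
--         graph[u].append(v)
--         graph[v].append(u)
--
--     # Helper function for BFS to find all nodes in a component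
--     def bfs(start_node, visited):
--         queue = deque([start_node])
--         visited.add(start_node)
--         while queue:
--             node = queue.popleft()
--             for neighbor in graph[node]:
--                 if neighbor not in visited:
--                     visited.add(neighbor)
--                     queue.append(neighbor)
--
--     visited = set()
--     num_components = 0
--
--     # Perform BFS from each unvisited node to count connected components
--     for i in range(n):
--         if i not in visited:
--             bfs(i, visited)
--             num_components += 1
--
--     # The number of operations needed is the number of components minus one
--     return num_components - 1
-- ===== SOURCE B (Python) =====
-- def minOperationsToConnectComputers(n, connections):
--     """
--     Returns the minimum number of operations required to connect all computers in the network.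
--     If it is not possible, return -1.
--     """
--     if len(connections) < n - 1:
--         return -1
--
--     # Disjoint-set merging: keep a list of disjoint component sets and fold
--     # every edge in by merging all sets that touch it.
--     comps = []
--     for u, v in connections:
--         merged = {u, v}
--         rest = []
--         for s in comps:
--             if u in s or v in s:
--                 merged |= s
--             else:
--                 rest.append(s)
--         comps = rest + [merged]
--
--     # Count distinct representatives over the nodes 0..n-1.
--     reps = set()
--     for i in range(n):
--         r = i
--         for s in comps:
--             if i in s:
--                 r = min(s)
--                 break
--         reps.add(r)
--     return len(reps) - 1
-- ===== Notes on version B (the rewrite author's own statement) =====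
-- stated objective: alternative
-- what changed: Replaced the BFS traversal (adjacency dict + deque + visited set per start node) by disjoint-set merging: fold every edge into a list of component sets, then count distinct component representatives over range(n).
import Mathlib
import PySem

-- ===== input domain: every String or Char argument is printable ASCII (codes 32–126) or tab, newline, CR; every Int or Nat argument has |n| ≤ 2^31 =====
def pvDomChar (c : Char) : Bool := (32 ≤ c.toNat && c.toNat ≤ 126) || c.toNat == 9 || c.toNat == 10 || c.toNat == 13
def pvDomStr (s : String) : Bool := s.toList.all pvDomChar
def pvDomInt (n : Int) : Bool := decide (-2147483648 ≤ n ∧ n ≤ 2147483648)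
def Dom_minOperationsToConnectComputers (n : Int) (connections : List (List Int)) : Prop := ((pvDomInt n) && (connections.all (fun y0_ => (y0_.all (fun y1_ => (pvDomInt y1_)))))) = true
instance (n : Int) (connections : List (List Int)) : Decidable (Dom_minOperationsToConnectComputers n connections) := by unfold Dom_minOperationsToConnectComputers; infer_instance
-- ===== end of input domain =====

-- B replaces A's per-node BFS traversal by disjoint-set merging (a list of component
-- sets folded over the edges) and counts distinct component representatives: an
-- alternative algorithm of similar cost, not claimed faster.

-- ===== PORT A =====
-- graph[u].append(v); graph[v].append(u)  (defaultdict(list))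
def pvGraphStep (g : PySem.Dict Int (List Int)) (e : List Int) : PySem.Dict Int (List Int) :=
  match e with
  | [u, v] =>
      let g1 := g.insert u (g.getD u [] ++ [v])
      g1.insert v (g1.getD v [] ++ [u])
  | _ => g

def pvGraphOf (connections : List (List Int)) : PySem.Dict Int (List Int) :=
  connections.foldl pvGraphStep PySem.Dict.empty

-- one neighbor: if neighbor not in visited: visited.add(neighbor); queue.append(neighbor)
def pvVisitStep (st : PySem.Set Int × List Int) (nb : Int) : PySem.Set Int × List Int :=
  if nb ∈ st.1 then st else (st.1.add nb, st.2 ++ [nb])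

-- the BFS while-loop: queue is a deque, visited a set; fuel is only a totality guard
def pvBfsLoop (g : PySem.Dict Int (List Int)) : Nat → List Int → PySem.Set Int → PySem.Set Int
  | 0, _, visited => visited
  | _ + 1, [], visited => visited
  | fuel + 1, node :: queue, visited =>
      let st := (g.getD node []).foldl pvVisitStep (visited, queue)
      pvBfsLoop g fuel st.2 st.1

-- for i in range(n): if i not in visited: bfs(i, visited); num_components += 1
def pvOuterA (g : PySem.Dict Int (List Int)) (fuel : Nat)
    (st : PySem.Set Int × Int) (i : Int) : PySem.Set Int × Int :=
  if i ∈ st.1 then st else (pvBfsLoop g fuel [i] (st.1.add i), st.2 + 1)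

def minOperationsToConnectComputers (n : Int) (connections : List (List Int)) : Int :=
  if PySem.List.len connections < n - 1 then -1
  else
    let graph := pvGraphOf connections
    let fuel := 2 * (n.toNat + 2 * connections.length) + 1
    let st := (PySem.List.pyRange 0 n 1).foldl (pvOuterA graph fuel) (PySem.Set.empty, 0)
    st.2 - 1

-- ===== PORT B =====
-- for s in comps: if u in s or v in s: merged |= s  else: rest.append(s)
def pvAbsorbStep (u v : Int) (st : PySem.Set Int × List (PySem.Set Int)) (s : PySem.Set Int) :
    PySem.Set Int × List (PySem.Set Int) :=
  if u ∈ s ∨ v ∈ s then (st.1.union s, st.2) else (st.1, st.2 ++ [s])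

-- one edge: absorb every component set containing u or v into {u, v}
def pvMergeStep (comps : List (PySem.Set Int)) (u v : Int) : List (PySem.Set Int) :=
  let st := comps.foldl (pvAbsorbStep u v) ((PySem.Set.empty.add u).add v, [])
  st.2 ++ [st.1]

def pvEdgeStep (comps : List (PySem.Set Int)) (e : List Int) : List (PySem.Set Int) :=
  match e with
  | [u, v] => pvMergeStep comps u v
  | _ => comps

def pvCompsOf (connections : List (List Int)) : List (PySem.Set Int) :=
  connections.foldl pvEdgeStep []

-- r = i; for s in comps: if i in s: r = min(s); break
def pvRepOf (comps : List (PySem.Set Int)) (i : Int) : Int :=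
  match comps.find? (fun s => decide (i ∈ s)) with
  | some s => (PySem.List.min? s (fun x => x)).getD i
  | none => i

def pvOuterB (comps : List (PySem.Set Int)) (reps : PySem.Set Int) (i : Int) : PySem.Set Int :=
  reps.add (pvRepOf comps i)

def minOperationsToConnectComputers_alt (n : Int) (connections : List (List Int)) : Int :=
  if PySem.List.len connections < n - 1 then -1
  else
    let comps := pvCompsOf connections
    let reps := (PySem.List.pyRange 0 n 1).foldl (pvOuterB comps) PySem.Set.empty
    PySem.Set.len reps - 1

-- ===== PRECONDITION & SPEC =====
-- Pre_ excludes only inputs on which A's 'for u, v in connections' actually runs and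
-- unpacks an edge entry that is not a two-element list (ValueError); when the initial
-- guard returns -1 before the loop, the input is admitted whatever the edges look like.
def Pre_minOperationsToConnectComputers (n : Int) (connections : List (List Int)) : Prop :=
  PySem.List.len connections < n - 1 ∨ ∀ e ∈ connections, e.length = 2
instance (n : Int) (connections : List (List Int)) : Decidable (Pre_minOperationsToConnectComputers n connections) := by unfold Pre_minOperationsToConnectComputers; infer_instance

def pvWitness_minOperationsToConnectComputers : Int × List (List Int) := (3, [[0, 1], [1, 2]])

def Spec_minOperationsToConnectComputers (n : Int) (connections : List (List Int)) (out : Int) : Prop := out = minOperationsToConnectComputers_alt n connections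
instance (n : Int) (connections : List (List Int)) (out : Int) : Decidable (Spec_minOperationsToConnectComputers n connections out) := by unfold Spec_minOperationsToConnectComputers; infer_instance

-- ===== CLAIM (what is proved, stated in full; the proofs are below) =====
def Claim_equal_minOperationsToConnectComputers : Prop := ∀ (n : Int) (connections : List (List Int)), Dom_minOperationsToConnectComputers n connections → Pre_minOperationsToConnectComputers n connections → Spec_minOperationsToConnectComputers n connections (minOperationsToConnectComputers n connections)

-- ===== LEMMAS AND PROOFS =====

-- undirected adjacency and connectivity generated by the edge list
def pvAdj (E : List (List Int)) (a b : Int) : Prop := [a, b] ∈ E ∨ [b, a] ∈ E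

def pvReach (E : List (List Int)) : Int → Int → Prop := Relation.ReflTransGen (pvAdj E)

def pvTouched (E : List (List Int)) (x : Int) : Prop := ∃ y, pvAdj E x y

lemma pvAdj_symm {E : List (List Int)} {a b : Int} (h : pvAdj E a b) : pvAdj E b a := h.symm

lemma pvReach_symm {E : List (List Int)} {x y : Int} (h : pvReach E x y) : pvReach E y x := by
  induction h with
  | refl => exact Relation.ReflTransGen.refl
  | tail _ hadj ih => exact Relation.ReflTransGen.trans (Relation.ReflTransGen.single (pvAdj_symm hadj)) ih

lemma pvReach_touched {E : List (List Int)} {x y : Int} (h : pvReach E x y) :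
    x = y ∨ (pvTouched E x ∧ pvTouched E y) := by
  induction h with
  | refl => exact Or.inl rfl
  | tail hr hadj ih =>
    right
    rename_i b c
    refine ⟨?_, ⟨b, pvAdj_symm hadj⟩⟩
    rcases ih with rfl | ⟨hx, _⟩
    · exact ⟨c, hadj⟩
    · exact hx

lemma pvReach_mono {E E' : List (List Int)} (hsub : ∀ a b, pvAdj E a b → pvAdj E' a b)
    {x y : Int} (h : pvReach E x y) : pvReach E' x y :=
  Relation.ReflTransGen.mono (fun a b hab => hsub a b hab) h

lemma pvAdj_append {E : List (List Int)} {u v a b : Int} :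
    pvAdj (E ++ [[u, v]]) a b ↔ pvAdj E a b ∨ (a = u ∧ b = v) ∨ (a = v ∧ b = u) := by
  simp only [pvAdj, List.mem_append, List.mem_singleton]
  constructor
  · rintro (h | h)
    · rcases h with h | h
      · exact Or.inl (Or.inl h)
      · simp at h; tauto
    · rcases h with h | h
      · exact Or.inl (Or.inr h)
      · simp at h; tauto
  · rintro ((h | h) | ⟨rfl, rfl⟩ | ⟨rfl, rfl⟩) <;> tauto

lemma pvReach_append {E : List (List Int)} {u v x y : Int} :
    pvReach (E ++ [[u, v]]) x y ↔
      pvReach E x y ∨ (pvReach E x u ∧ pvReach E v y) ∨ (pvReach E x v ∧ pvReach E u y) := by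
  constructor
  · intro h
    induction h with
    | refl => exact Or.inl Relation.ReflTransGen.refl
    | tail _ hadj ih =>
      rename_i b c _
      rcases pvAdj_append.1 hadj with hold | ⟨rfl, rfl⟩ | ⟨rfl, rfl⟩
      · rcases ih with h1 | ⟨h1, h2⟩ | ⟨h1, h2⟩
        · exact Or.inl (h1.tail hold)
        · exact Or.inr (Or.inl ⟨h1, h2.tail hold⟩)
        · exact Or.inr (Or.inr ⟨h1, h2.tail hold⟩)
      · rcases ih with h1 | ⟨h1, h2⟩ | ⟨h1, h2⟩
        · exact Or.inr (Or.inl ⟨h1, Relation.ReflTransGen.refl⟩)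
        · exact Or.inr (Or.inl ⟨h1, Relation.ReflTransGen.refl⟩)
        · exact Or.inl h1
      · rcases ih with h1 | ⟨h1, h2⟩ | ⟨h1, h2⟩
        · exact Or.inr (Or.inr ⟨h1, Relation.ReflTransGen.refl⟩)
        · exact Or.inl h1
        · exact Or.inr (Or.inr ⟨h1, Relation.ReflTransGen.refl⟩)
  · have hmono : ∀ a b, pvAdj E a b → pvAdj (E ++ [[u, v]]) a b := by
      intro a b h; rcases h with h | h
      · exact Or.inl (List.mem_append_left _ h)
      · exact Or.inr (List.mem_append_left _ h)
    have hnew : pvAdj (E ++ [[u, v]]) u v := Or.inl (List.mem_append_right _ (List.mem_singleton.2 rfl))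
    rintro (h | ⟨h1, h2⟩ | ⟨h1, h2⟩)
    · exact pvReach_mono hmono h
    · exact ((pvReach_mono hmono h1).trans (Relation.ReflTransGen.single hnew)).trans (pvReach_mono hmono h2)
    · exact ((pvReach_mono hmono h1).trans (Relation.ReflTransGen.single (pvAdj_symm hnew))).trans (pvReach_mono hmono h2)

lemma pvAdj_cons {u v : Int} {E : List (List Int)} {a b : Int} :
    pvAdj ([u, v] :: E) a b ↔ ((a = u ∧ b = v) ∨ (a = v ∧ b = u)) ∨ pvAdj E a b := by
  simp only [pvAdj, List.mem_cons, List.cons.injEq, and_true]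
  tauto

-- ----- A side: the adjacency dict realizes pvAdj -----
lemma pvGraphStep_mem (g : PySem.Dict Int (List Int)) (u v x y : Int) :
    y ∈ (pvGraphStep g [u, v]).getD x [] ↔
      y ∈ g.getD x [] ∨ ((x = u ∧ y = v) ∨ (x = v ∧ y = u)) := by
  simp only [pvGraphStep, PySem.Dict.getD_insert]
  by_cases hxv : x = v <;> by_cases hxu : x = u <;> by_cases hvu : v = u <;>
    simp_all [List.mem_append]

lemma pvGraphOf_go (conns : List (List Int)) :
    ∀ (g : PySem.Dict Int (List Int)) (x y : Int), (∀ e ∈ conns, e.length = 2) →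
      (y ∈ (conns.foldl pvGraphStep g).getD x [] ↔ y ∈ g.getD x [] ∨ pvAdj conns x y) := by
  induction conns with
  | nil => intro g x y _; simp [pvAdj]
  | cons e rest ih =>
    intro g x y hPre
    obtain ⟨u, v, rfl⟩ : ∃ u v, e = [u, v] := by
      have h2 := hPre e (List.mem_cons_self)
      match e, h2 with
      | [u, v], _ => exact ⟨u, v, rfl⟩
    rw [List.foldl_cons,
        ih (pvGraphStep g [u, v]) x y (fun e he => hPre e (List.mem_cons_of_mem _ he)),
        pvGraphStep_mem, pvAdj_cons]
    tauto

lemma mem_pvGraphOf (conns : List (List Int)) (hPre : ∀ e ∈ conns, e.length = 2) (x y : Int) :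
    y ∈ (pvGraphOf conns).getD x [] ↔ pvAdj conns x y := by
  unfold pvGraphOf
  rw [pvGraphOf_go conns PySem.Dict.empty x y hPre]
  simp [PySem.Dict.getD_empty]

-- ----- A side: the inner neighbor fold -----
lemma pvVisit_go (nbs : List Int) :
    ∀ (vis : PySem.Set Int) (q : List Int), vis.Nodup →
      ∃ new : List Int,
        (nbs.foldl pvVisitStep (vis, q)).1 = vis ++ new ∧
        (nbs.foldl pvVisitStep (vis, q)).2 = q ++ new ∧
        (vis ++ new).Nodup ∧
        (∀ x ∈ new, x ∈ nbs) ∧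
        (∀ x ∈ nbs, x ∈ vis ++ new) := by
  induction nbs with
  | nil =>
    intro vis q h
    exact ⟨[], by simp, by simp, by simpa using h, by simp, by simp⟩
  | cons nb nbs ih =>
    intro vis q hnd
    rw [List.foldl_cons]
    by_cases h : nb ∈ vis
    · simp only [pvVisitStep, if_pos h]
      obtain ⟨new, h1, h2, h3, h4, h5⟩ := ih vis q hnd
      exact ⟨new, h1, h2, h3, fun x hx => List.mem_cons_of_mem _ (h4 x hx),
        by
          intro x hx
          rcases List.mem_cons.1 hx with rfl | hx
          · exact List.mem_append_left _ h
          · exact h5 x hx⟩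
    · simp only [pvVisitStep, if_neg h, PySem.Set.add_of_not_mem h]
      have hnd' : (vis ++ [nb]).Nodup := by
        refine List.Nodup.append hnd (List.nodup_singleton _) ?_
        intro a ha hb
        rw [List.mem_singleton] at hb
        subst hb
        exact h ha
      obtain ⟨new, h1, h2, h3, h4, h5⟩ := ih (vis ++ [nb]) (q ++ [nb]) hnd'
      refine ⟨nb :: new, ?_, ?_, ?_, ?_, ?_⟩
      · rw [h1, List.append_assoc]; rfl
      · rw [h2, List.append_assoc]; rfl
      · rw [List.append_cons]; exact h3
      · intro x hx
        rcases List.mem_cons.1 hx with rfl | hx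
        · exact List.mem_cons_self
        · exact List.mem_cons_of_mem _ (h4 x hx)
      · intro x hx
        rcases List.mem_cons.1 hx with rfl | hx
        · exact List.mem_append_right _ List.mem_cons_self
        · have := h5 x hx
          rw [List.append_cons]; exact this

-- ----- A side: the BFS loop -----
lemma pvBfsLoop_sound (E : List (List Int)) (g : PySem.Dict Int (List Int))
    (hadj : ∀ x y : Int, y ∈ g.getD x [] ↔ pvAdj E x y) (i : Int) (P : Int → Prop) :
    ∀ (fuel : Nat) (q : List Int) (vis : PySem.Set Int), vis.Nodup →
      (∀ s ∈ q, pvReach E i s) → (∀ x ∈ vis, P x ∨ pvReach E i x) →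
      ∀ x ∈ pvBfsLoop g fuel q vis, P x ∨ pvReach E i x := by
  intro fuel
  induction fuel with
  | zero => intro q vis _ _ hvis x hx; exact hvis x hx
  | succ f ih =>
    intro q vis hnd hq hvis x hx
    cases q with
    | nil => exact hvis x hx
    | cons node rest =>
      obtain ⟨new, e1, e2, hnd', hnewnbs, _⟩ := pvVisit_go (g.getD node []) vis rest hnd
      simp only [pvBfsLoop] at hx
      rw [e1, e2] at hx
      have hrnode : pvReach E i node := hq node List.mem_cons_self
      refine ih (rest ++ new) (vis ++ new) hnd' ?_ ?_ x hx
      · intro s hs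
        rcases List.mem_append.1 hs with hs | hs
        · exact hq s (List.mem_cons_of_mem _ hs)
        · exact hrnode.tail ((hadj node s).1 (hnewnbs s hs))
      · intro z hz
        rcases List.mem_append.1 hz with hz | hz
        · exact hvis z hz
        · exact Or.inr (hrnode.tail ((hadj node z).1 (hnewnbs z hz)))

lemma pvLen_le_card (U : Finset Int) (l : List Int) (hnd : l.Nodup) (h : ∀ x ∈ l, x ∈ U) :
    l.length ≤ U.card := by
  calc l.length = l.toFinset.card := (List.toFinset_card_of_nodup hnd).symm
    _ ≤ U.card := Finset.card_le_card (fun x hx => h x (List.mem_toFinset.1 hx))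

lemma pvBfsLoop_spec (E : List (List Int)) (g : PySem.Dict Int (List Int)) (U : Finset Int)
    (hadj : ∀ x y : Int, y ∈ g.getD x [] ↔ pvAdj E x y)
    (hUadj : ∀ a b : Int, pvAdj E a b → b ∈ U) :
    ∀ (fuel : Nat) (q : List Int) (vis : PySem.Set Int),
      vis.Nodup → (∀ s ∈ q, s ∈ vis) → (∀ x ∈ vis, x ∈ U) →
      (∀ x ∈ vis, ∀ y, pvAdj E x y → y ∈ vis ∨ x ∈ q) →
      2 * (U.card - vis.length) + q.length ≤ fuel →
      (∀ x ∈ vis, x ∈ pvBfsLoop g fuel q vis) ∧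
      (pvBfsLoop g fuel q vis).Nodup ∧
      (∀ x ∈ pvBfsLoop g fuel q vis, x ∈ U) ∧
      (∀ x ∈ pvBfsLoop g fuel q vis, ∀ y, pvAdj E x y → y ∈ pvBfsLoop g fuel q vis) := by
  intro fuel
  induction fuel with
  | zero =>
    intro q vis hnd hq hU hcl hfuel
    have hq0 : q = [] := by
      cases q with
      | nil => rfl
      | cons a t => simp [List.length_cons] at hfuel
    subst hq0
    exact ⟨fun x hx => hx, hnd, hU,
      fun x hx y hxy => (hcl x hx y hxy).resolve_right (by simp)⟩
  | succ f ih =>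
    intro q vis hnd hq hU hcl hfuel
    cases q with
    | nil =>
      exact ⟨fun x hx => hx, hnd, hU,
        fun x hx y hxy => (hcl x hx y hxy).resolve_right (by simp)⟩
    | cons node rest =>
      obtain ⟨new, e1, e2, hnd', hnewnbs, hnbs⟩ := pvVisit_go (g.getD node []) vis rest hnd
      simp only [pvBfsLoop]
      rw [e1, e2]
      have hnewU : ∀ x ∈ new, x ∈ U := fun x hx =>
        hUadj node x ((hadj node x).1 (hnewnbs x hx))
      have hUnion : ∀ x ∈ vis ++ new, x ∈ U := by
        intro x hx
        rcases List.mem_append.1 hx with hx | hx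
        · exact hU x hx
        · exact hnewU x hx
      have hlen : (vis ++ new).length ≤ U.card := pvLen_le_card U _ hnd' hUnion
      have hfuel' : 2 * (U.card - (vis ++ new).length) + (rest ++ new).length ≤ f := by
        simp only [List.length_append, List.length_cons] at hfuel hlen ⊢
        omega
      have hq' : ∀ s ∈ rest ++ new, s ∈ vis ++ new := by
        intro s hs
        rcases List.mem_append.1 hs with hs | hs
        · exact List.mem_append_left _ (hq s (List.mem_cons_of_mem _ hs))
        · exact List.mem_append_right _ hs
      have hcl' : ∀ x ∈ vis ++ new, ∀ y, pvAdj E x y → y ∈ vis ++ new ∨ x ∈ rest ++ new := by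
        intro x hx y hxy
        rcases List.mem_append.1 hx with hx | hx
        · rcases hcl x hx y hxy with hy | hxq
          · exact Or.inl (List.mem_append_left _ hy)
          · rcases List.mem_cons.1 hxq with rfl | hxr
            · exact Or.inl (hnbs y ((hadj x y).2 hxy))
            · exact Or.inr (List.mem_append_left _ hxr)
        · exact Or.inr (List.mem_append_right _ hx)
      obtain ⟨m1, m2, m3, m4⟩ := ih (rest ++ new) (vis ++ new) hnd' hq' hUnion hcl' hfuel'
      exact ⟨fun x hx => m1 x (List.mem_append_left _ hx), m2, m3, m4⟩

lemma pvBfs_char (E : List (List Int)) (g : PySem.Dict Int (List Int)) (U : Finset Int)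
    (hadj : ∀ x y : Int, y ∈ g.getD x [] ↔ pvAdj E x y)
    (hUadj : ∀ a b : Int, pvAdj E a b → b ∈ U)
    (fuel : Nat) (hfuel : 2 * U.card + 1 ≤ fuel)
    (vis : PySem.Set Int) (i : Int)
    (hnd : vis.Nodup) (hsubU : ∀ x ∈ vis, x ∈ U)
    (hclosed : ∀ x ∈ vis, ∀ y, pvAdj E x y → y ∈ vis) (hiU : i ∈ U) :
    (∀ x, x ∈ pvBfsLoop g fuel [i] (vis.add i) ↔ x ∈ vis ∨ pvReach E i x) ∧
    (pvBfsLoop g fuel [i] (vis.add i)).Nodup ∧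
    (∀ x ∈ pvBfsLoop g fuel [i] (vis.add i), x ∈ U) ∧
    (∀ x ∈ pvBfsLoop g fuel [i] (vis.add i), ∀ y, pvAdj E x y → y ∈ pvBfsLoop g fuel [i] (vis.add i)) := by
  have hndi : (vis.add i).Nodup := PySem.Set.nodup_add _ _ hnd
  have hmemadd : ∀ x, x ∈ vis.add i ↔ x ∈ vis ∨ x = i := fun x => PySem.Set.mem_add vis i x
  have hq : ∀ s ∈ ([i] : List Int), s ∈ vis.add i := by
    intro s hs
    rw [List.mem_singleton] at hs
    subst hs
    exact (hmemadd s).2 (Or.inr rfl)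
  have hUi : ∀ x ∈ vis.add i, x ∈ U := by
    intro x hx
    rcases (hmemadd x).1 hx with hx | rfl
    · exact hsubU x hx
    · exact hiU
  have hcli : ∀ x ∈ vis.add i, ∀ y, pvAdj E x y → y ∈ vis.add i ∨ x ∈ ([i] : List Int) := by
    intro x hx y hxy
    rcases (hmemadd x).1 hx with hx | rfl
    · exact Or.inl ((hmemadd y).2 (Or.inl (hclosed x hx y hxy)))
    · exact Or.inr (List.mem_singleton.2 rfl)
  have hfuel' : 2 * (U.card - (vis.add i).length) + ([i] : List Int).length ≤ fuel := by
    have h1 : U.card - (vis.add i).length ≤ U.card := Nat.sub_le _ _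
    simp only [List.length_singleton]
    omega
  obtain ⟨m1, m2, m3, m4⟩ := pvBfsLoop_spec E g U hadj hUadj fuel [i] (vis.add i) hndi hq hUi hcli hfuel'
  refine ⟨?_, m2, m3, m4⟩
  intro x
  constructor
  · intro hx
    have := pvBfsLoop_sound E g hadj i (fun z => z ∈ vis) fuel [i] (vis.add i) hndi
      (by intro s hs; rw [List.mem_singleton] at hs; subst hs; exact Relation.ReflTransGen.refl)
      (by intro z hz; rcases (hmemadd z).1 hz with hz | rfl
          · exact Or.inl hz
          · exact Or.inr Relation.ReflTransGen.refl) x hx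
    exact this
  · intro hx
    rcases hx with hx | hx
    · exact m1 x ((hmemadd x).2 (Or.inl hx))
    · induction hx with
      | refl => exact m1 i ((hmemadd i).2 (Or.inr rfl))
      | tail _ hadj' ih' => exact m4 _ ih' _ hadj'

-- ----- B side: the merge fold -----
lemma pvMergeStep_go (u v : Int) (comps : List (PySem.Set Int)) :
    ∀ (m : PySem.Set Int) (r : List (PySem.Set Int)),
      (comps.foldl (pvAbsorbStep u v) (m, r)).2 =
        r ++ comps.filter (fun s => !(decide (u ∈ s) || decide (v ∈ s))) ∧
      (∀ x, x ∈ (comps.foldl (pvAbsorbStep u v) (m, r)).1 ↔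
        x ∈ m ∨ ∃ S ∈ comps, (u ∈ S ∨ v ∈ S) ∧ x ∈ S) := by
  induction comps with
  | nil => intro m r; simp
  | cons s comps ih =>
    intro m r
    rw [List.foldl_cons]
    by_cases h : u ∈ s ∨ v ∈ s
    · simp only [pvAbsorbStep, if_pos h]
      obtain ⟨h1, h2⟩ := ih (m.union s) r
      constructor
      · rw [h1]
        congr 1
        simp [List.filter_cons]
        tauto
      · intro x
        rw [h2 x]
        simp only [PySem.Set.mem_union, List.mem_cons]
        constructor
        · rintro ((hx | hx) | ⟨S, hS, hins, hx⟩)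
          · exact Or.inl hx
          · exact Or.inr ⟨s, Or.inl rfl, h, hx⟩
          · exact Or.inr ⟨S, Or.inr hS, hins, hx⟩
        · rintro (hx | ⟨S, (rfl | hS), hins, hx⟩)
          · exact Or.inl (Or.inl hx)
          · exact Or.inl (Or.inr hx)
          · exact Or.inr ⟨S, hS, hins, hx⟩
    · simp only [pvAbsorbStep, if_neg h]
      obtain ⟨h1, h2⟩ := ih m (r ++ [s])
      constructor
      · rw [h1]
        have : List.filter (fun s => !(decide (u ∈ s) || decide (v ∈ s))) (s :: comps)
            = s :: List.filter (fun s => !(decide (u ∈ s) || decide (v ∈ s))) comps := by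
          simp [List.filter_cons]
          tauto
        rw [this, List.append_cons, List.append_assoc]
        simp
      · intro x
        rw [h2 x]
        constructor
        · rintro (hx | ⟨S, hS, hins, hx⟩)
          · exact Or.inl hx
          · exact Or.inr ⟨S, List.mem_cons_of_mem _ hS, hins, hx⟩
        · rintro (hx | ⟨S, hS, hins, hx⟩)
          · exact Or.inl hx
          · rcases List.mem_cons.1 hS with rfl | hS
            · exact absurd hins h
            · exact Or.inr ⟨S, hS, hins, hx⟩

def pvInv (E : List (List Int)) (comps : List (PySem.Set Int)) : Prop :=
  (∀ S ∈ comps, ∀ x ∈ S, pvTouched E x) ∧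
  (∀ x, pvTouched E x → ∃ S ∈ comps, x ∈ S) ∧
  (∀ S ∈ comps, ∀ x ∈ S, ∀ y, (y ∈ S → pvReach E x y) ∧ (pvReach E x y → y ∈ S))

lemma pvInv_step (E : List (List Int)) (comps : List (PySem.Set Int)) (u v : Int)
    (h : pvInv E comps) : pvInv (E ++ [[u, v]]) (pvMergeStep comps u v) := by
  obtain ⟨hT, hC, hR⟩ := h
  obtain ⟨e2, hM⟩ := pvMergeStep_go u v comps ((PySem.Set.empty.add u).add v) []
  set M := (comps.foldl (pvAbsorbStep u v) ((PySem.Set.empty.add u).add v, [])).1 with hMdef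
  have hMuv : ∀ x, x ∈ M ↔ (x = u ∨ x = v) ∨ ∃ S ∈ comps, (u ∈ S ∨ v ∈ S) ∧ x ∈ S := by
    intro x
    rw [hM x]
    constructor
    · rintro (hx | hx)
      · rcases (PySem.Set.mem_add _ _ _).1 hx with hx | rfl
        · rcases (PySem.Set.mem_add _ _ _).1 hx with hx | rfl
          · simp [PySem.Set.empty] at hx
          · exact Or.inl (Or.inl rfl)
        · exact Or.inl (Or.inr rfl)
      · exact Or.inr hx
    · rintro ((rfl | rfl) | hx)
      · exact Or.inl ((PySem.Set.mem_add _ _ _).2 (Or.inl ((PySem.Set.mem_add _ _ _).2 (Or.inr rfl))))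
      · exact Or.inl ((PySem.Set.mem_add _ _ _).2 (Or.inr rfl))
      · exact Or.inr hx
  have hmerge : pvMergeStep comps u v =
      comps.filter (fun s => !(decide (u ∈ s) || decide (v ∈ s))) ++ [M] := by
    show (comps.foldl (pvAbsorbStep u v) ((PySem.Set.empty.add u).add v, [])).2 ++
        [(comps.foldl (pvAbsorbStep u v) ((PySem.Set.empty.add u).add v, [])).1] = _
    rw [e2, ← hMdef]
    simp
  have hmem : ∀ S', S' ∈ pvMergeStep comps u v ↔
      (S' ∈ comps ∧ ¬(u ∈ S' ∨ v ∈ S')) ∨ S' = M := by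
    intro S'
    rw [hmerge]
    simp only [List.mem_append, List.mem_filter, List.mem_singleton]
    constructor
    · rintro (⟨hS, hcond⟩ | rfl)
      · refine Or.inl ⟨hS, ?_⟩
        intro hc
        simp only [Bool.not_eq_true', Bool.or_eq_false_iff, decide_eq_false_iff_not] at hcond
        tauto
      · exact Or.inr rfl
    · rintro (⟨hS, hcond⟩ | rfl)
      · refine Or.inl ⟨hS, ?_⟩
        simp only [Bool.not_eq_true', Bool.or_eq_false_iff, decide_eq_false_iff_not]
        tauto
      · exact Or.inr rfl
  have hmonoAdj : ∀ a b, pvAdj E a b → pvAdj (E ++ [[u, v]]) a b := by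
    intro a b hab
    rcases hab with hab | hab
    · exact Or.inl (List.mem_append_left _ hab)
    · exact Or.inr (List.mem_append_left _ hab)
  have hmono : ∀ {x y : Int}, pvReach E x y → pvReach (E ++ [[u, v]]) x y :=
    fun hx => pvReach_mono hmonoAdj hx
  have hnew : pvAdj (E ++ [[u, v]]) u v := Or.inl (List.mem_append_right _ (List.mem_singleton.2 rfl))
  have hT' : ∀ x, pvTouched (E ++ [[u, v]]) x ↔ pvTouched E x ∨ x = u ∨ x = v := by
    intro x
    constructor
    · rintro ⟨y, hy⟩
      rcases pvAdj_append.1 hy with hy | ⟨rfl, rfl⟩ | ⟨rfl, rfl⟩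
      · exact Or.inl ⟨y, hy⟩
      · exact Or.inr (Or.inl rfl)
      · exact Or.inr (Or.inr rfl)
    · rintro (⟨y, hy⟩ | rfl | rfl)
      · exact ⟨y, hmonoAdj _ _ hy⟩
      · exact ⟨v, hnew⟩
      · exact ⟨u, pvAdj_symm hnew⟩
  -- every member of M reaches u in the extended graph
  have hru : ∀ z ∈ M, pvReach (E ++ [[u, v]]) z u := by
    intro z hz
    rcases (hMuv z).1 hz with (rfl | rfl) | ⟨S, hS, huv, hzS⟩
    · exact Relation.ReflTransGen.refl
    · exact Relation.ReflTransGen.single (pvAdj_symm hnew)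
    · rcases huv with hu | hv
      · exact hmono ((hR S hS z hzS u).1 hu)
      · exact (hmono ((hR S hS z hzS v).1 hv)).trans
          (Relation.ReflTransGen.single (pvAdj_symm hnew))
  refine ⟨?_, ?_, ?_⟩
  · -- all members touched
    intro S' hS' x hx
    rcases (hmem S').1 hS' with ⟨hS, _⟩ | rfl
    · exact (hT' x).2 (Or.inl (hT S' hS x hx))
    · rcases (hMuv x).1 hx with (rfl | rfl) | ⟨S, hS, _, hxS⟩
      · exact (hT' x).2 (Or.inr (Or.inl rfl))
      · exact (hT' x).2 (Or.inr (Or.inr rfl))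
      · exact (hT' x).2 (Or.inl (hT S hS x hxS))
  · -- cover
    intro x hx
    rcases (hT' x).1 hx with hx | hxu | hxv
    · obtain ⟨S, hS, hxS⟩ := hC x hx
      by_cases huv : u ∈ S ∨ v ∈ S
      · exact ⟨M, (hmem M).2 (Or.inr rfl), (hMuv x).2 (Or.inr ⟨S, hS, huv, hxS⟩)⟩
      · exact ⟨S, (hmem S).2 (Or.inl ⟨hS, huv⟩), hxS⟩
    · exact ⟨M, (hmem M).2 (Or.inr rfl), (hMuv x).2 (Or.inl (Or.inl hxu))⟩
    · exact ⟨M, (hmem M).2 (Or.inr rfl), (hMuv x).2 (Or.inl (Or.inr hxv))⟩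
  · -- classes
    intro S' hS' x hx y
    rcases (hmem S').1 hS' with ⟨hS, hcond⟩ | rfl
    · constructor
      · intro hy
        exact hmono ((hR S' hS x hx y).1 hy)
      · intro hxy
        rcases pvReach_append.1 hxy with hxy | ⟨h1, h2⟩ | ⟨h1, h2⟩
        · exact (hR S' hS x hx y).2 hxy
        · exact absurd (Or.inl ((hR S' hS x hx u).2 h1)) hcond
        · exact absurd (Or.inr ((hR S' hS x hx v).2 h1)) hcond
    · constructor
      · intro hy
        exact (hru x hx).trans (pvReach_symm (hru y hy))
      · intro hxy
        rcases pvReach_append.1 hxy with hxy | ⟨h1, h2⟩ | ⟨h1, h2⟩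
        · -- plain old reach from a member of M
          rcases pvReach_touched hxy with rfl | ⟨htx, hty⟩
          · exact hx
          · obtain ⟨S, hS, hxS⟩ := hC x htx
            have hyS : y ∈ S := (hR S hS x hxS y).2 hxy
            have huvS : u ∈ S ∨ v ∈ S := by
              rcases (hMuv x).1 hx with (rfl | rfl) | ⟨S2, hS2, huv2, hxS2⟩
              · exact Or.inl hxS
              · exact Or.inr hxS
              · -- x lies in S2 which meets {u,v}; S and S2 share x, so S meets {u,v} too
                rcases huv2 with hu | hv
                · exact Or.inl ((hR S hS x hxS u).2 ((hR S2 hS2 x hxS2 u).1 hu))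
                · exact Or.inr ((hR S hS x hxS v).2 ((hR S2 hS2 x hxS2 v).1 hv))
            exact (hMuv y).2 (Or.inr ⟨S, hS, huvS, hyS⟩)
        · -- reach via the new edge, ending from v
          rcases pvReach_touched h2 with hvy | ⟨htv, hty⟩
          · exact (hMuv y).2 (Or.inl (Or.inr hvy.symm))
          · obtain ⟨S, hS, hvS⟩ := hC v htv
            have hyS : y ∈ S := (hR S hS v hvS y).2 h2
            exact (hMuv y).2 (Or.inr ⟨S, hS, Or.inr hvS, hyS⟩)
        · rcases pvReach_touched h2 with huy | ⟨htu, hty⟩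
          · exact (hMuv y).2 (Or.inl (Or.inl huy.symm))
          · obtain ⟨S, hS, huS⟩ := hC u htu
            have hyS : y ∈ S := (hR S hS u huS y).2 h2
            exact (hMuv y).2 (Or.inr ⟨S, hS, Or.inl huS, hyS⟩)

lemma pvCompsOf_inv (conns : List (List Int)) (hPre : ∀ e ∈ conns, e.length = 2) :
    pvInv conns (pvCompsOf conns) := by
  have go : ∀ (cs E : List (List Int)) (comps : List (PySem.Set Int)),
      (∀ e ∈ cs, e.length = 2) → pvInv E comps →
      pvInv (E ++ cs) (cs.foldl pvEdgeStep comps) := by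
    intro cs
    induction cs with
    | nil => intro E comps _ hInv; simpa using hInv
    | cons e rest ih =>
      intro E comps hPre hInv
      obtain ⟨u, v, rfl⟩ : ∃ u v, e = [u, v] := by
        have h2 := hPre e List.mem_cons_self
        match e, h2 with
        | [u, v], _ => exact ⟨u, v, rfl⟩
      rw [List.foldl_cons]
      have heq : E ++ ([u, v] :: rest) = (E ++ [[u, v]]) ++ rest := by
        simp
      rw [heq]
      refine ih (E ++ [[u, v]]) (pvEdgeStep comps [u, v])
        (fun e' he' => hPre e' (List.mem_cons_of_mem _ he')) ?_
      show pvInv (E ++ [[u, v]]) (pvMergeStep comps u v)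
      exact pvInv_step E comps u v hInv
  have base : pvInv [] [] := by
    refine ⟨by simp, ?_, by simp⟩
    rintro x ⟨y, hy | hy⟩ <;> simp at hy
  simpa using go conns [] [] hPre base

-- ----- B side: representatives respect connectivity -----
lemma pvRep_eq_iff (E : List (List Int)) (comps : List (PySem.Set Int)) (hInv : pvInv E comps)
    (i j : Int) : pvRepOf comps i = pvRepOf comps j ↔ pvReach E i j := by
  obtain ⟨hT, hC, hR⟩ := hInv
  have hfind : ∀ (z : Int) (S : PySem.Set Int),
      comps.find? (fun s => decide (z ∈ s)) = some S → z ∈ S ∧ S ∈ comps := by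
    intro z S h
    have hp := List.find?_some (p := fun s => decide (z ∈ s)) (a := S) (l := comps) h
    simp only [decide_eq_true_eq] at hp
    exact ⟨hp, List.mem_of_find?_eq_some h⟩
  have hnone : ∀ z : Int, comps.find? (fun s => decide (z ∈ s)) = none → ¬ pvTouched E z := by
    intro z h ht
    obtain ⟨S, hS, hzS⟩ := hC z ht
    have := List.find?_eq_none.1 h S hS
    simp only [decide_eq_true_eq] at this
    exact this hzS
  have hrepS : ∀ (z : Int) (S : PySem.Set Int), comps.find? (fun s => decide (z ∈ s)) = some S →
      pvRepOf comps z = (PySem.List.min? S (fun x => x)).getD z := by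
    intro z S h
    simp only [pvRepOf, h]
  have hrepN : ∀ z : Int, comps.find? (fun s => decide (z ∈ s)) = none → pvRepOf comps z = z := by
    intro z h
    simp only [pvRepOf, h]
  have hminD : ∀ (S : PySem.Set Int) (a : Int), S ≠ [] →
      ∃ m, (PySem.List.min? S (fun x => x)).getD a = m ∧ m ∈ S ∧ ∀ y ∈ S, m ≤ y := by
    intro S a hne
    cases hmin : PySem.List.min? S (fun x => x) with
    | none => exact absurd ((PySem.List.min?_eq_none_iff S _).1 hmin) hne
    | some m =>
      exact ⟨m, by simp, PySem.List.min?_mem hmin, fun y hy => PySem.List.min?_isMin hmin y hy⟩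
  cases hfi : comps.find? (fun s => decide (i ∈ s)) with
  | none =>
    cases hfj : comps.find? (fun s => decide (j ∈ s)) with
    | none =>
      rw [hrepN i hfi, hrepN j hfj]
      constructor
      · rintro rfl; exact Relation.ReflTransGen.refl
      · intro h
        rcases pvReach_touched h with h | ⟨hti, _⟩
        · exact h
        · exact absurd hti (hnone i hfi)
    | some Sj =>
      obtain ⟨hjS, hSj⟩ := hfind j Sj hfj
      obtain ⟨mj, hgetDj, hmjS, _⟩ := hminD Sj j (List.ne_nil_of_mem hjS)
      rw [hrepN i hfi, hrepS j Sj hfj, hgetDj]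
      constructor
      · intro heq
        exfalso
        exact hnone i hfi (hT Sj hSj i (by rw [heq]; exact hmjS))
      · intro h
        exfalso
        rcases pvReach_touched h with heq | ⟨hti, _⟩
        · rw [heq, hfj] at hfi; cases hfi
        · exact hnone i hfi hti
  | some Si =>
    obtain ⟨hiS, hSi⟩ := hfind i Si hfi
    obtain ⟨mi, hgetDi, hmiS, hmiMin⟩ := hminD Si i (List.ne_nil_of_mem hiS)
    cases hfj : comps.find? (fun s => decide (j ∈ s)) with
    | none =>
      rw [hrepS i Si hfi, hrepN j hfj, hgetDi]
      constructor
      · intro heq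
        exfalso
        exact hnone j hfj (hT Si hSi j (by rw [← heq]; exact hmiS))
      · intro h
        exfalso
        rcases pvReach_touched h with heq | ⟨_, htj⟩
        · rw [← heq, hfi] at hfj; cases hfj
        · exact hnone j hfj htj
    | some Sj =>
      obtain ⟨hjS, hSj⟩ := hfind j Sj hfj
      obtain ⟨mj, hgetDj, hmjS, hmjMin⟩ := hminD Sj j (List.ne_nil_of_mem hjS)
      rw [hrepS i Si hfi, hrepS j Sj hfj, hgetDi, hgetDj]
      constructor
      · intro heq
        have h1 : pvReach E i mi := (hR Si hSi i hiS mi).1 hmiS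
        have h2 : pvReach E mj j := (hR Sj hSj mj hmjS j).1 hjS
        rw [heq] at h1
        exact h1.trans h2
      · intro h
        have hjSi : j ∈ Si := (hR Si hSi i hiS j).2 h
        have hsame : ∀ x, x ∈ Si ↔ x ∈ Sj := by
          intro x
          constructor
          · intro hx
            exact (hR Sj hSj j hjS x).2 ((hR Si hSi j hjSi x).1 hx)
          · intro hx
            exact (hR Si hSi j hjSi x).2 ((hR Sj hSj j hjS x).1 hx)
        exact le_antisymm (hmiMin mj ((hsame mj).2 hmjS)) (hmjMin mi ((hsame mi).1 hmiS))

-- ----- joint main loop -----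
lemma pvMain_go (E : List (List Int)) (g : PySem.Dict Int (List Int)) (fuel : Nat)
    (U : Finset Int) (comps : List (PySem.Set Int))
    (hadj : ∀ x y : Int, y ∈ g.getD x [] ↔ pvAdj E x y)
    (hUadj : ∀ a b : Int, pvAdj E a b → b ∈ U)
    (hInv : pvInv E comps)
    (hfuel : 2 * U.card + 1 ≤ fuel) :
    ∀ (l done : List Int) (visA : PySem.Set Int) (cnt : Int) (reps : PySem.Set Int),
      (∀ i ∈ l, i ∈ U) →
      visA.Nodup → (∀ x ∈ visA, x ∈ U) →
      (∀ x ∈ visA, ∀ y, pvAdj E x y → y ∈ visA) →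
      (∀ x, x ∈ visA ↔ ∃ j ∈ done, pvReach E j x) →
      (∀ r, r ∈ reps ↔ ∃ j ∈ done, pvRepOf comps j = r) →
      ((l.foldl (pvOuterA g fuel) (visA, cnt)).2 : Int) -
          PySem.Set.len (l.foldl (pvOuterB comps) reps) = cnt - PySem.Set.len reps := by
  intro l
  induction l with
  | nil => intro done visA cnt reps _ _ _ _ _ _; simp
  | cons i l ih =>
    intro done visA cnt reps hlU hnd hU hcl hvis hreps
    rw [List.foldl_cons, List.foldl_cons]
    have hrepiff : ∀ j, pvRepOf comps j = pvRepOf comps i ↔ pvReach E j i :=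
      fun j => pvRep_eq_iff E comps hInv j i
    by_cases hm : i ∈ visA
    · have hstepA : pvOuterA g fuel (visA, cnt) i = (visA, cnt) := by
        simp [pvOuterA, hm]
      have hrmem : pvRepOf comps i ∈ reps := by
        obtain ⟨j, hj, hreach⟩ := (hvis i).1 hm
        exact (hreps _).2 ⟨j, hj, (hrepiff j).2 hreach⟩
      have hstepB : pvOuterB comps reps i = reps := by
        simp [pvOuterB, PySem.Set.add_of_mem hrmem]
      rw [hstepA, hstepB]
      refine ih (done ++ [i]) visA cnt reps
        (fun x hx => hlU x (List.mem_cons_of_mem _ hx)) hnd hU hcl ?_ ?_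
      · intro x
        rw [hvis x]
        constructor
        · rintro ⟨j, hj, h⟩
          exact ⟨j, List.mem_append_left _ hj, h⟩
        · rintro ⟨j, hj, h⟩
          rcases List.mem_append.1 hj with hj | hj
          · exact ⟨j, hj, h⟩
          · rw [List.mem_singleton] at hj
            rw [hj] at h
            obtain ⟨j0, hj0, hr0⟩ := (hvis i).1 hm
            exact ⟨j0, hj0, hr0.trans h⟩
      · intro r
        rw [hreps r]
        constructor
        · rintro ⟨j, hj, h⟩
          exact ⟨j, List.mem_append_left _ hj, h⟩
        · rintro ⟨j, hj, h⟩
          rcases List.mem_append.1 hj with hj | hj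
          · exact ⟨j, hj, h⟩
          · rw [List.mem_singleton] at hj
            subst hj
            exact (hreps r).1 (h ▸ hrmem)
    · have hiU : i ∈ U := hlU i List.mem_cons_self
      obtain ⟨hchar, hnd', hU', hcl'⟩ :=
        pvBfs_char E g U hadj hUadj fuel hfuel visA i hnd hU hcl hiU
      have hstepA : pvOuterA g fuel (visA, cnt) i
          = (pvBfsLoop g fuel [i] (visA.add i), cnt + 1) := by
        simp [pvOuterA, hm]
      have hrnot : pvRepOf comps i ∉ reps := by
        intro hr
        obtain ⟨j, hj, hrep⟩ := (hreps _).1 hr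
        exact hm ((hvis i).2 ⟨j, hj, (hrepiff j).1 hrep⟩)
      have hstepB : pvOuterB comps reps i = reps ++ [pvRepOf comps i] := by
        simp only [pvOuterB]
        exact PySem.Set.add_of_not_mem hrnot
      rw [hstepA, hstepB]
      have hv' : ∀ x, x ∈ pvBfsLoop g fuel [i] (visA.add i) ↔
          ∃ j ∈ done ++ [i], pvReach E j x := by
        intro x
        rw [hchar x]
        constructor
        · rintro (hx | hx)
          · obtain ⟨j, hj, h⟩ := (hvis x).1 hx
            exact ⟨j, List.mem_append_left _ hj, h⟩
          · exact ⟨i, List.mem_append_right _ (List.mem_singleton.2 rfl), hx⟩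
        · rintro ⟨j, hj, h⟩
          rcases List.mem_append.1 hj with hj | hj
          · exact Or.inl ((hvis x).2 ⟨j, hj, h⟩)
          · rw [List.mem_singleton] at hj
            subst hj
            exact Or.inr h
      have hr' : ∀ r, r ∈ reps ++ [pvRepOf comps i] ↔
          ∃ j ∈ done ++ [i], pvRepOf comps j = r := by
        intro r
        constructor
        · intro hrm
          rcases List.mem_append.1 hrm with hrm | hrm
          · obtain ⟨j, hj, h⟩ := (hreps r).1 hrm
            exact ⟨j, List.mem_append_left _ hj, h⟩
          · rw [List.mem_singleton] at hrm
            subst hrm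
            exact ⟨i, List.mem_append_right _ (List.mem_singleton.2 rfl), rfl⟩
        · rintro ⟨j, hj, h⟩
          rcases List.mem_append.1 hj with hj | hj
          · exact List.mem_append_left _ ((hreps r).2 ⟨j, hj, h⟩)
          · rw [List.mem_singleton] at hj
            subst hj
            exact List.mem_append_right _ (List.mem_singleton.2 h.symm)
      have hrec := ih (done ++ [i]) (pvBfsLoop g fuel [i] (visA.add i)) (cnt + 1)
        (reps ++ [pvRepOf comps i])
        (fun x hx => hlU x (List.mem_cons_of_mem _ hx)) hnd' hU' hcl' hv' hr'
      have hlen : PySem.Set.len (reps ++ [pvRepOf comps i]) = PySem.Set.len reps + 1 := by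
        simp [PySem.Set.len]
      rw [hrec, hlen]
      ring

lemma pvFlatMap_len (conns : List (List Int)) (hPre : ∀ e ∈ conns, e.length = 2) :
    (conns.flatMap id).length = 2 * conns.length := by
  induction conns with
  | nil => simp
  | cons e rest ih =>
    have he := hPre e (List.mem_cons_self)
    have := ih (fun e' he' => hPre e' (List.mem_cons_of_mem _ he'))
    simp only [List.flatMap_cons, List.length_append, id_eq, this, he, List.length_cons]
    ring

lemma pvPyRange_len : ∀ (k : Nat) (a b : Int), (b - a).toNat = k →
    (PySem.List.pyRange a b 1).length = k := by
  intro k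
  induction k with
  | zero =>
    intro a b hk
    have hnil : PySem.List.pyRange a b 1 = [] := by
      rw [List.eq_nil_iff_forall_not_mem]
      intro x hx
      have := PySem.List.mem_pyRange_one.1 hx
      omega
    rw [hnil]
    rfl
  | succ k ih =>
    intro a b hk
    have hab : a < b := by omega
    rw [PySem.List.pyRange_one_cons hab, List.length_cons, ih (a + 1) b (by omega)]

-- ===== VERDICT (by name: the statement is the Claim_ definition above) =====
theorem minOperationsToConnectComputers_spec : Claim_equal_minOperationsToConnectComputers := by
  unfold Claim_equal_minOperationsToConnectComputers
  intro n conns hDom hPre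
  unfold Spec_minOperationsToConnectComputers
  by_cases hg : PySem.List.len conns < n - 1
  · simp only [minOperationsToConnectComputers, minOperationsToConnectComputers_alt, if_pos hg]
  · replace hPre : ∀ e ∈ conns, e.length = 2 := hPre.resolve_left hg
    simp only [minOperationsToConnectComputers, minOperationsToConnectComputers_alt, if_neg hg]
    set U : Finset Int := ((PySem.List.pyRange 0 n 1) ++ conns.flatMap id).toFinset with hUdef
    have hadj := mem_pvGraphOf conns hPre
    have hUadj : ∀ a b : Int, pvAdj conns a b → b ∈ U := by
      intro a b hab
      rw [hUdef, List.mem_toFinset]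
      rcases hab with h | h
      · exact List.mem_append_right _ (List.mem_flatMap.2 ⟨[a, b], h, by simp⟩)
      · exact List.mem_append_right _ (List.mem_flatMap.2 ⟨[b, a], h, by simp⟩)
    have hInv := pvCompsOf_inv conns hPre
    have hcard : U.card ≤ n.toNat + 2 * conns.length := by
      calc U.card ≤ ((PySem.List.pyRange 0 n 1) ++ conns.flatMap id).length :=
            List.toFinset_card_le _
        _ = (PySem.List.pyRange 0 n 1).length + (conns.flatMap id).length :=
            List.length_append
        _ = n.toNat + 2 * conns.length := by
            rw [pvPyRange_len n.toNat 0 n (by simp), pvFlatMap_len conns hPre]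
    have hfuel : 2 * U.card + 1 ≤ 2 * (n.toNat + 2 * conns.length) + 1 := by omega
    have hlU : ∀ i ∈ PySem.List.pyRange 0 n 1, i ∈ U := by
      intro i hi
      rw [hUdef, List.mem_toFinset]
      exact List.mem_append_left _ hi
    have key := pvMain_go conns (pvGraphOf conns) (2 * (n.toNat + 2 * conns.length) + 1) U
      (pvCompsOf conns) hadj hUadj hInv hfuel (PySem.List.pyRange 0 n 1) []
      PySem.Set.empty 0 PySem.Set.empty
      hlU (by simp [PySem.Set.empty]) (by simp [PySem.Set.empty]) (by simp [PySem.Set.empty])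
      (by simp [PySem.Set.empty]) (by simp [PySem.Set.empty])
    have he : PySem.Set.len (PySem.Set.empty : PySem.Set Int) = 0 := rfl
    rw [he] at key
    omega
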